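-- pv_equiv track=rewrite | github.com/MONROYJ04/6E2_22310267_PracticasIA | Busqueda_Grafos/1_Planificacion/3.0_Satisfaccion_de_Restricciones/22_Busqueda_Local_Minimos_Conflictos.py | esta_en_conflicto
-- ===== SOURCE A (Python) =====
-- def esta_en_conflicto(asignacion, columna, tamano_tablero):
--     """
--     Verifica si la reina en una columna está en conflicto con otras reinas.
--     :param asignacion: Lista que representa la fila de cada reina en cada columna.
--     :param columna: Columna a verificar.
--     :param tamano_tablero: Tamaño del tablero.
--     :return: True si hay conflicto, False en caso contrario.
--     """
--     fila = asignacion[columna]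
--     for otra_columna in range(tamano_tablero):
--         if otra_columna == columna:
--             continue
--         otra_fila = asignacion[otra_columna]
--         # Conflicto si están en la misma fila o en la misma diagonal
--         if otra_fila == fila or abs(otra_fila - fila) == abs(otra_columna - columna):
--             return True
--     return False
-- ===== SOURCE B (Python) =====
-- def esta_en_conflicto(asignacion, columna, tamano_tablero):
--     """True si la reina de `columna` choca con otra reina (misma fila o diagonal)."""
--     fila = asignacion[columna]
--     filas = set()
--     diag_princ = set()
--     diag_sec = set()
--     for c in range(tamano_tablero):
--         if c == columna:
--             continue
--         r = asignacion[c]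
--         filas.add(r)
--         diag_princ.add(r - c)
--         diag_sec.add(r + c)
--     return fila in filas or fila - columna in diag_princ or fila + columna in diag_sec
-- ===== Notes on version B (the rewrite author's own statement) =====
-- stated objective: alternative
-- what changed: Replaces the compare-on-the-fly early-return scan with one pass that builds three index sets of the other queens (rows, row-c diagonals, row+c anti-diagonals) and answers by three membership lookups; Pre_ excludes out-of-range columna (A raises IndexError) and tamano_tablero > len(asignacion), where A may raise mid-loop or return True early while B always scans the whole range and raises.
-- outside the precondition, e.g. on esta_en_conflicto([0, 0], 0, 3): A returns True, B raises IndexError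
import Mathlib
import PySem

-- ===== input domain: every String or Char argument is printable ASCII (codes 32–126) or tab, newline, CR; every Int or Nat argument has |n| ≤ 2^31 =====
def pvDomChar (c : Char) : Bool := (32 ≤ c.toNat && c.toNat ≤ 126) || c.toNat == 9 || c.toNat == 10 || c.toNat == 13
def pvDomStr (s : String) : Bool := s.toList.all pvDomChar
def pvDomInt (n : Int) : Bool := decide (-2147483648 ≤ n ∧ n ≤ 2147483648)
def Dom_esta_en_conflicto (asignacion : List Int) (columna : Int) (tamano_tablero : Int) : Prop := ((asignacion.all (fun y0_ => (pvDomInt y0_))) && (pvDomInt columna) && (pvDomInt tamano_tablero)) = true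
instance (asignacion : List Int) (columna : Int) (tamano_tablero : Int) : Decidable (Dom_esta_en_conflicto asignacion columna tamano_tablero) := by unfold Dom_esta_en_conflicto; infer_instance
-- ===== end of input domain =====

-- B builds three index sets of the other queens (rows, main diagonals, anti-diagonals) in one

-- pass and answers by membership lookups, instead of A's compare-on-the-fly early-return scan.



-- ===== PORT A =====
-- the 'for otra_columna in range(tamano_tablero)' loop with its early return
def pvLoopA (asignacion : List Int) (columna fila : Int) : List Int → Bool
  | [] => false
  | c :: rest =>
    if c = columna then pvLoopA asignacion columna fila rest
    else
      match PySem.List.pyGet? asignacion c with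
      | none => false   -- IndexError; excluded by Pre_
      | some r =>
        if r = fila ∨ (r - fila).natAbs = (c - columna).natAbs then true
        else pvLoopA asignacion columna fila rest

def esta_en_conflicto (asignacion : List Int) (columna : Int) (tamano_tablero : Int) : Bool :=
  match PySem.List.pyGet? asignacion columna with
  | none => false   -- IndexError; excluded by Pre_
  | some fila => pvLoopA asignacion columna fila (PySem.List.pyRange 0 tamano_tablero 1)

-- ===== PORT B =====
-- one pass building the three index sets of the OTHER queens (rows, r-c, r+c)
def pvStepB (asignacion : List Int) (columna : Int)
    (s : PySem.Set Int × PySem.Set Int × PySem.Set Int) (c : Int) :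
    PySem.Set Int × PySem.Set Int × PySem.Set Int :=
  if c = columna then s
  else
    let r := PySem.List.pyGetD asignacion c 0   -- in range under Pre_
    (s.1.add r, s.2.1.add (r - c), s.2.2.add (r + c))

def esta_en_conflicto_alt (asignacion : List Int) (columna : Int) (tamano_tablero : Int) : Bool :=
  match PySem.List.pyGet? asignacion columna with
  | none => false   -- IndexError; excluded by Pre_
  | some fila =>
    let t := (PySem.List.pyRange 0 tamano_tablero 1).foldl (pvStepB asignacion columna)
      (PySem.Set.empty, PySem.Set.empty, PySem.Set.empty)
    t.1.contains fila || t.2.1.contains (fila - columna) || t.2.2.contains (fila + columna)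

-- ===== PRECONDITION & SPEC =====
-- Pre_ excludes inputs where A raises IndexError (columna out of Python index range), and —
-- for simplicity of statement — boards with tamano_tablero > len(asignacion), where A may
-- either raise mid-loop or return True early depending on the data (B always scans the
-- whole range and raises on all of those; see claim cites).
def Pre_esta_en_conflicto (asignacion : List Int) (columna : Int) (tamano_tablero : Int) : Prop :=
  PySem.Raise.InRange asignacion.length columna ∧ tamano_tablero ≤ (asignacion.length : Int)
instance (asignacion : List Int) (columna : Int) (tamano_tablero : Int) : Decidable (Pre_esta_en_conflicto asignacion columna tamano_tablero) := by unfold Pre_esta_en_conflicto; infer_instance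
def pvWitness_esta_en_conflicto : List Int × Int × Int := ([0, 2, 1], 1, 3)
def Spec_esta_en_conflicto (asignacion : List Int) (columna : Int) (tamano_tablero : Int) (out : Bool) : Prop := out = esta_en_conflicto_alt asignacion columna tamano_tablero
instance (asignacion : List Int) (columna : Int) (tamano_tablero : Int) (out : Bool) : Decidable (Spec_esta_en_conflicto asignacion columna tamano_tablero out) := by unfold Spec_esta_en_conflicto; infer_instance

-- ===== CLAIM (what is proved, stated in full; the proofs are below) =====
def Claim_equal_esta_en_conflicto : Prop := ∀ (asignacion : List Int) (columna : Int) (tamano_tablero : Int), Dom_esta_en_conflicto asignacion columna tamano_tablero → Pre_esta_en_conflicto asignacion columna tamano_tablero → Spec_esta_en_conflicto asignacion columna tamano_tablero (esta_en_conflicto asignacion columna tamano_tablero)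

-- ===== LEMMAS AND PROOFS =====

-- A's loop is an existence test over the range
lemma pvLoopA_iff (asignacion : List Int) (columna fila : Int) (l : List Int)
    (hin : ∀ c ∈ l, PySem.List.pyGet? asignacion c = some (PySem.List.pyGetD asignacion c 0)) :
    pvLoopA asignacion columna fila l = true ↔
      ∃ c ∈ l, c ≠ columna ∧
        (PySem.List.pyGetD asignacion c 0 = fila ∨
         (PySem.List.pyGetD asignacion c 0 - fila).natAbs = (c - columna).natAbs) := by
  induction l with
  | nil => simp [pvLoopA]
  | cons c rest ih =>
    have hc := hin c (by simp)
    have hrest : ∀ c' ∈ rest, PySem.List.pyGet? asignacion c' = some (PySem.List.pyGetD asignacion c' 0) :=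
      fun c' h => hin c' (by simp [h])
    by_cases hceq : c = columna
    · subst hceq
      simp [pvLoopA, ih hrest]
    · simp only [pvLoopA, if_neg hceq, hc]
      by_cases hcond : PySem.List.pyGetD asignacion c 0 = fila ∨
          (PySem.List.pyGetD asignacion c 0 - fila).natAbs = (c - columna).natAbs
      · rw [if_pos hcond]
        exact ⟨fun _ => ⟨c, by simp, hceq, hcond⟩, fun _ => rfl⟩
      · rw [if_neg hcond, ih hrest]
        constructor
        · rintro ⟨x, hx, hxc, hpx⟩; exact ⟨x, by simp [hx], hxc, hpx⟩
        · rintro ⟨x, hx, hxc, hpx⟩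
          rcases List.mem_cons.mp hx with rfl | hx
          · exact absurd hpx hcond
          · exact ⟨x, hx, hxc, hpx⟩

-- B's fold builds, componentwise, the set-update of the mapped range with columna filtered out
lemma pvFoldB_eq (asignacion : List Int) (columna : Int) (l : List Int)
    (s1 s2 s3 : PySem.Set Int) :
    l.foldl (pvStepB asignacion columna) (s1, s2, s3) =
      (PySem.Set.update s1 ((l.filter (fun c => c ≠ columna)).map
          (fun c => PySem.List.pyGetD asignacion c 0)),
       PySem.Set.update s2 ((l.filter (fun c => c ≠ columna)).map
          (fun c => PySem.List.pyGetD asignacion c 0 - c)),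
       PySem.Set.update s3 ((l.filter (fun c => c ≠ columna)).map
          (fun c => PySem.List.pyGetD asignacion c 0 + c))) := by
  induction l generalizing s1 s2 s3 with
  | nil => simp
  | cons c rest ih =>
    by_cases hc : c = columna
    · subst hc
      simp [List.foldl_cons, pvStepB, ih]
    · simp [List.foldl_cons, pvStepB, hc, ih, PySem.Set.update_cons]

-- ===== VERDICT (by name: the statement is the Claim_ definition above) =====
theorem esta_en_conflicto_spec : Claim_equal_esta_en_conflicto := by
  intro asignacion columna tamano_tablero _hdom hpre
  obtain ⟨hidx, htam⟩ := hpre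
  unfold Spec_esta_en_conflicto
  obtain ⟨fila, hfila⟩ : ∃ v, PySem.List.pyGet? asignacion columna = some v := by
    rcases h : PySem.List.pyGet? asignacion columna with _ | v
    · exact absurd ((PySem.List.pyGet?_eq_none_iff _ _).mp h) (not_not.mpr hidx)
    · exact ⟨v, rfl⟩
  set l := PySem.List.pyRange 0 tamano_tablero 1 with hl
  have hmem : ∀ c ∈ l, 0 ≤ c ∧ c < tamano_tablero := by
    intro c hc; exact (PySem.List.mem_pyRange_one).mp hc
  have hin : ∀ c ∈ l, PySem.List.pyGet? asignacion c = some (PySem.List.pyGetD asignacion c 0) := by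
    intro c hc
    obtain ⟨h0, h1⟩ := hmem c hc
    have hlt : c.toNat < asignacion.length := by omega
    rw [PySem.List.pyGet?_of_nonneg _ h0,
        PySem.List.pyGetD_eq_getElem asignacion 0 h0 (by omega), List.getElem?_eq_getElem hlt]
  set f1 : Int → Int := fun c => PySem.List.pyGetD asignacion c 0 with hf1
  set f2 : Int → Int := fun c => PySem.List.pyGetD asignacion c 0 - c with hf2
  set f3 : Int → Int := fun c => PySem.List.pyGetD asignacion c 0 + c with hf3
  -- the diagonal test, split into the two key equalities
  have key : ∀ c : Int, (f1 c = fila ∨ (f1 c - fila).natAbs = (c - columna).natAbs) ↔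
      (f1 c = fila ∨ f2 c = fila - columna ∨ f3 c = fila + columna) := by
    intro c
    simp only [hf1, hf2, hf3]
    constructor <;> (intro h; omega)
  unfold esta_en_conflicto esta_en_conflicto_alt
  rw [hfila]
  simp only [← hl]
  rw [pvFoldB_eq]
  rw [Bool.eq_iff_iff, pvLoopA_iff asignacion columna fila l hin]
  simp only [Bool.or_eq_true, PySem.Set.contains_iff, PySem.Set.mem_update,
    PySem.Set.empty, List.not_mem_nil, false_or, List.mem_map,
    List.mem_filter, decide_eq_true_eq]
  constructor
  · rintro ⟨c, hc, hne, h⟩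
    rcases (key c).mp h with h | h | h
    · exact Or.inl (Or.inl ⟨c, ⟨hc, hne⟩, h⟩)
    · exact Or.inl (Or.inr ⟨c, ⟨hc, hne⟩, h⟩)
    · exact Or.inr ⟨c, ⟨hc, hne⟩, h⟩
  · rintro ((⟨c, ⟨hc, hne⟩, h⟩ | ⟨c, ⟨hc, hne⟩, h⟩) | ⟨c, ⟨hc, hne⟩, h⟩) <;>
      exact ⟨c, hc, hne, (key c).mpr (by tauto)⟩
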